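-- pv_equiv track=rewrite | github.com/Lucas-Chavez/ProgramacionI-Parcial-1 | PARCIAL 2/MUTANTES/is_mutant.py | is_mutant
-- ===== SOURCE A (Python) =====
-- def is_mutant(dna):
--     def is_valid_dna_matrix(dna):
--         # Verificar si la matriz de ADN tiene las dimensiones correctas (6x6)
--         return len(dna) == 6 and all(len(row) == 6 for row in dna)
--
--     def has_valid_dna_sequence(sequence):
--         # Verificar si la longitud de la secuencia es mayor o igual a 4 y si alguna de las secuencias objetivo se encuentra en la secuencia.
--         return len(sequence) >= 4 and any(seq in sequence for seq in ["AAAA", "CCCC", "TTTT", "GGGG"])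
--
--     def check_sequences(dna, length):
--         # Definimos un contador que indica la cantidad de secuencias de ADN válidas
--         sequence_counter = 0
--         # Verificar filas
--         # Comprobamos si hay una secuencia de cuatro caracteres iguales en cada fila
--         for row in dna:
--             if has_valid_dna_sequence(row):
--                 sequence_counter += 1
--         # Verificar columnas
--         # Comprobamos si hay una secuencia de cuatro caracteres iguales en cada columna
--         for col in range(length):
--             if has_valid_dna_sequence(''.join(dna[row][col] for row in range(length))):
--                 sequence_counter += 1
--         # Verificar diagonales
--         # Comenzamos las iteraciones a partir de 3 para evitar secuencias de ADN con longitudes menores a 4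
--         for number in range(3, length):
--             # Verifica las secuencias de las diagonales superiores izquierdas
--             if has_valid_dna_sequence(''.join(dna[number - i][i] for i in range(number + 1))):
--                 sequence_counter += 1
--             # Verifica las secuencias de las diagonales superiores derechas
--             if has_valid_dna_sequence(''.join(dna[i + 1][(length + i) - number] for i in range(-1, number))):
--                 sequence_counter += 1
--             # Condición para evitar iterar elementos repetidos
--             if number < 5:
--                 # Verifica las secuencias de las diagonales inferiores izquierdas
--                 if has_valid_dna_sequence(''.join(dna[(length + i) - (number + 1)][i] for i in range(number + 1))):
--                     sequence_counter += 1
--                 # Verifica las secuencias de las diagonales inferiores derechas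
--                 if has_valid_dna_sequence(''.join(dna[i][(length - 1) - ((i + number) - (length - 1))] for i in range((length - 1) - number, length))):
--                     sequence_counter += 1
--         # Devolvemos la contidad de secuencias validas
--         return sequence_counter
--
--     # Verificamos si la matriz de ADN tiene las dimensiones correctas
--     if is_valid_dna_matrix(dna):
--         # Definimos la longitud de la lista de ADN
--         length = len(dna)
--
--         # Definimos una variable que alamacena el total de secuencias repetidas
--         repeated_sequences = check_sequences(dna, length)
--
--         # Devolvemos True si se encuentran más de una secuencia de cuatro letras iguales
--         return repeated_sequences > 1
--
--     return False
-- ===== SOURCE B (Python) =====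
-- def is_mutant(dna):
--     # Bucket-based rewrite: one pass over the cells builds column and diagonal
--     # buckets; then count lines (rows, columns, diagonals) containing a quad.
--     if len(dna) != 6 or any(len(row) != 6 for row in dna):
--         return False
--     targets = ("AAAA", "CCCC", "TTTT", "GGGG")
--     cols = [[] for _ in range(6)]
--     main_diags = {}   # key r - c
--     anti_diags = {}   # key r + c
--     for r, row in enumerate(dna):
--         for c, ch in enumerate(row):
--             cols[c].append(ch)
--             main_diags.setdefault(r - c, []).append(ch)
--             anti_diags.setdefault(r + c, []).append(ch)
--     lines = list(dna)
--     lines += [''.join(col) for col in cols]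
--     lines += [''.join(chars) for chars in main_diags.values()]
--     lines += [''.join(chars) for chars in anti_diags.values()]
--     count = sum(1 for line in lines if any(t in line for t in targets))
--     return count > 1
-- ===== Notes on version B (the rewrite author's own statement) =====
-- stated objective: simpler
-- what changed: Replaces A's three hand-indexed diagonal loops (with per-number case splits) by a single pass over the cells that buckets characters by column, r-c and r+c, then counts the lines containing a repeated-letter quad; short diagonal buckets are harmless since no 4-letter target fits in them.
import Mathlib
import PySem

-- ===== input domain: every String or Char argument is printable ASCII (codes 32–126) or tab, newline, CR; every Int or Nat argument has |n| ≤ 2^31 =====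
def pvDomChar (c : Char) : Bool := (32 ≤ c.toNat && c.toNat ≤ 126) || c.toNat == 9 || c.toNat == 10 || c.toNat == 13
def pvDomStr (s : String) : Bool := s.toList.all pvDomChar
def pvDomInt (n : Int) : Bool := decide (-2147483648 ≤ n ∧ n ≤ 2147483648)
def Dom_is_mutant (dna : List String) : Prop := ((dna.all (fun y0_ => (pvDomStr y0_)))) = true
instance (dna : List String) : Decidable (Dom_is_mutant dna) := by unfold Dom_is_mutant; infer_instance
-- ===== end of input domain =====

-- B replaces A's three index-arithmetic diagonal loops by one pass over the cells
-- that buckets characters per diagonal key, then counts matching lines (objective: simpler).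

-- ===== PORT A =====
-- has_valid_dna_sequence
def pvHasValid (s : String) : Bool :=
  decide (4 ≤ PySem.Str.len s) &&
    (["AAAA", "CCCC", "TTTT", "GGGG"] : List String).any (fun q => PySem.Str.isIn q s)

-- dna[r][c]; under the 6x6 guard every index used by A is in range, so the defaults are never read
def pvCharAt (dna : List String) (r c : Int) : Char :=
  (PySem.Str.pyGet? ((PySem.List.pyGet? dna r).getD "") c).getD ' '

-- check_sequences
def pvCheckSequences (dna : List String) (length : Int) : Nat :=
  let c1 := dna.foldl (fun acc row => if pvHasValid row then acc + 1 else acc) 0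
  let c2 := (PySem.List.pyRange 0 length 1).foldl (fun acc col =>
      if pvHasValid (String.ofList ((PySem.List.pyRange 0 length 1).map
          (fun row => pvCharAt dna row col))) then acc + 1 else acc) c1
  (PySem.List.pyRange 3 length 1).foldl (fun acc number =>
      let a1 := if pvHasValid (String.ofList ((PySem.List.pyRange 0 (number + 1) 1).map
          (fun i => pvCharAt dna (number - i) i))) then acc + 1 else acc
      let a2 := if pvHasValid (String.ofList ((PySem.List.pyRange (-1) number 1).map
          (fun i => pvCharAt dna (i + 1) ((length + i) - number)))) then a1 + 1 else a1
      if number < 5 then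
        let a3 := if pvHasValid (String.ofList ((PySem.List.pyRange 0 (number + 1) 1).map
            (fun i => pvCharAt dna ((length + i) - (number + 1)) i))) then a2 + 1 else a2
        if pvHasValid (String.ofList ((PySem.List.pyRange ((length - 1) - number) length 1).map
            (fun i => pvCharAt dna i ((length - 1) - ((i + number) - (length - 1)))))) then a3 + 1 else a3
      else a2) c2

def is_mutant (dna : List String) : Bool :=
  if (dna.length == 6) && dna.all (fun row => PySem.Str.len row == 6) then
    decide (1 < pvCheckSequences dna 6)
  else false

-- ===== PORT B =====
-- any(t in line for t in targets)
def pvHit (line : String) : Bool :=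
  (["AAAA", "CCCC", "TTTT", "GGGG"] : List String).any (fun t => PySem.Str.isIn t line)

-- the cell pass: cols buckets, main-diagonal dict (key r-c), anti-diagonal dict (key r+c);
-- Python's `d.setdefault(k, []).append(ch)` is exactly `d.modify k [] (· ++ [ch])`
def pvBuckets (dna : List String) :
    List (List Char) × PySem.Dict Int (List Char) × PySem.Dict Int (List Char) :=
  (PySem.List.enumerate dna).foldl
    (fun st rr =>
      (PySem.List.enumerate rr.2.toList).foldl
        (fun st cc =>
          let cols := st.1
          let mains := st.2.1
          let antis := st.2.2
          let r := rr.1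
          let c := cc.1
          let ch := cc.2
          (cols.set c.toNat ((cols.getD c.toNat []) ++ [ch]),
           mains.modify (r - c) [] (fun l => l ++ [ch]),
           antis.modify (r + c) [] (fun l => l ++ [ch])))
        st)
    (List.replicate 6 [], PySem.Dict.empty, PySem.Dict.empty)

def is_mutant_alt (dna : List String) : Bool :=
  if (dna.length != 6) || dna.any (fun row => PySem.Str.len row != 6) then false
  else
    let b := pvBuckets dna
    let lines := dna ++ b.1.map String.ofList
        ++ b.2.1.values.map String.ofList ++ b.2.2.values.map String.ofList
    decide (1 < lines.countP (fun line => pvHit line))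

-- ===== PRECONDITION & SPEC =====
def Spec_is_mutant (dna : List String) (out : Bool) : Prop := out = is_mutant_alt dna
instance (dna : List String) (out : Bool) : Decidable (Spec_is_mutant dna out) := by unfold Spec_is_mutant; infer_instance

-- ===== CLAIM (what is proved, stated in full; the proofs are below) =====
def Claim_equal_is_mutant : Prop := ∀ (dna : List String), Dom_is_mutant dna → Spec_is_mutant dna (is_mutant dna)

-- ===== LEMMAS AND PROOFS =====

-- a target is unchanged by reversal, so reading a line backwards hits iff reading it forwards does
theorem pvIsIn_rev (t : String) (ht : t.toList.reverse = t.toList) (l : List Char) :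
    PySem.Str.isIn t (String.ofList l.reverse) = PySem.Str.isIn t (String.ofList l) := by
  rw [Bool.eq_iff_iff, PySem.Str.isIn_iff_infix, PySem.Str.isIn_iff_infix,
      String.toList_ofList, String.toList_ofList]
  constructor
  · intro hinf
    rw [← ht] at hinf
    exact List.reverse_infix.mp hinf
  · intro hinf
    rw [← ht]
    exact List.reverse_infix.mpr hinf

theorem pvIsIn_long (t : String) (l : List Char) (h : l.length < t.toList.length) :
    PySem.Str.isIn t (String.ofList l) = false := by
  rcases hb : PySem.Str.isIn t (String.ofList l) with _ | _
  · rfl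
  · have hinf := (PySem.Str.isIn_iff_infix t (String.ofList l)).mp hb
    have hle := hinf.length_le
    rw [String.toList_ofList] at hle
    omega

theorem pvHit_reverse (l : List Char) :
    pvHit (String.ofList l.reverse) = pvHit (String.ofList l) := by
  simp only [pvHit, List.any_cons, List.any_nil, Bool.or_false]
  rw [pvIsIn_rev "AAAA" (by decide), pvIsIn_rev "CCCC" (by decide),
      pvIsIn_rev "TTTT" (by decide), pvIsIn_rev "GGGG" (by decide)]

-- B's anti-diagonal buckets of the upper-left triangle read A's strings back to front
theorem pvHitRev4 (a b c d : Char) :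
    pvHit (String.ofList [a, b, c, d]) = pvHit (String.ofList [d, c, b, a]) := by
  simpa using pvHit_reverse [d, c, b, a]

theorem pvHitRev5 (a b c d e : Char) :
    pvHit (String.ofList [a, b, c, d, e]) = pvHit (String.ofList [e, d, c, b, a]) := by
  simpa using pvHit_reverse [e, d, c, b, a]

theorem pvHitRev6 (a b c d e f : Char) :
    pvHit (String.ofList [a, b, c, d, e, f]) = pvHit (String.ofList [f, e, d, c, b, a]) := by
  simpa using pvHit_reverse [f, e, d, c, b, a]

-- a line shorter than 4 never contains a 4-character target
theorem pvHit_short (l : List Char) (h : l.length < 4) : pvHit (String.ofList l) = false := by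
  simp only [pvHit, List.any_cons, List.any_nil, Bool.or_false]
  rw [pvIsIn_long "AAAA" l (by simpa using h), pvIsIn_long "CCCC" l (by simpa using h),
      pvIsIn_long "TTTT" l (by simpa using h), pvIsIn_long "GGGG" l (by simpa using h)]
  rfl

theorem pvHs1 (a : Char) : pvHit (String.ofList [a]) = false := pvHit_short [a] (by simp)
theorem pvHs2 (a b : Char) : pvHit (String.ofList [a, b]) = false := pvHit_short [a, b] (by simp)
theorem pvHs3 (a b c : Char) : pvHit (String.ofList [a, b, c]) = false :=
  pvHit_short [a, b, c] (by simp)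

-- on lines of length ≥ 4, A's has_valid_dna_sequence is B's hit test
theorem pvHasValid_eq_pvHit (s : String) (h : 4 ≤ s.toList.length) :
    pvHasValid s = pvHit s := by
  have h4 : decide (4 ≤ PySem.Str.len s) = true := by
    simp [PySem.Str.len_eq]
    exact_mod_cast h
  unfold pvHasValid pvHit
  rw [h4, Bool.true_and]

theorem pvHv4 (a b c d : Char) :
    pvHasValid (String.ofList [a, b, c, d]) = pvHit (String.ofList [a, b, c, d]) :=
  pvHasValid_eq_pvHit _ (by simp)
theorem pvHv5 (a b c d e : Char) :
    pvHasValid (String.ofList [a, b, c, d, e]) = pvHit (String.ofList [a, b, c, d, e]) :=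
  pvHasValid_eq_pvHit _ (by simp)
theorem pvHv6 (a b c d e f : Char) :
    pvHasValid (String.ofList [a, b, c, d, e, f]) = pvHit (String.ofList [a, b, c, d, e, f]) :=
  pvHasValid_eq_pvHit _ (by simp)

theorem pvIteInc (b : Bool) (x : Nat) : (if b then x + 1 else x) = x + b.toNat := by
  cases b <;> simp

theorem pvSixOfLen {α : Type} {l : List α} (h : l.length = 6) :
    ∃ a b c d e f, l = [a, b, c, d, e, f] := by
  match l, h with
  | [a, b, c, d, e, f], _ => exact ⟨a, b, c, d, e, f, rfl⟩

-- the 6x6 core: on a full grid both programs count the same lines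
set_option maxHeartbeats 2000000 in
set_option maxRecDepth 8192 in
theorem pvMain6 (a00 a01 a02 a03 a04 a05 a10 a11 a12 a13 a14 a15 a20 a21 a22 a23 a24 a25 a30 a31 a32 a33 a34 a35 a40 a41 a42 a43 a44 a45 a50 a51 a52 a53 a54 a55 : Char) :
    is_mutant [String.ofList [a00, a01, a02, a03, a04, a05], String.ofList [a10, a11, a12, a13, a14, a15], String.ofList [a20, a21, a22, a23, a24, a25], String.ofList [a30, a31, a32, a33, a34, a35], String.ofList [a40, a41, a42, a43, a44, a45], String.ofList [a50, a51, a52, a53, a54, a55]] = is_mutant_alt [String.ofList [a00, a01, a02, a03, a04, a05], String.ofList [a10, a11, a12, a13, a14, a15], String.ofList [a20, a21, a22, a23, a24, a25], String.ofList [a30, a31, a32, a33, a34, a35], String.ofList [a40, a41, a42, a43, a44, a45], String.ofList [a50, a51, a52, a53, a54, a55]] := by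
  have hbuck : pvBuckets [String.ofList [a00, a01, a02, a03, a04, a05], String.ofList [a10, a11, a12, a13, a14, a15], String.ofList [a20, a21, a22, a23, a24, a25], String.ofList [a30, a31, a32, a33, a34, a35], String.ofList [a40, a41, a42, a43, a44, a45], String.ofList [a50, a51, a52, a53, a54, a55]] =
      ([[a00, a10, a20, a30, a40, a50], [a01, a11, a21, a31, a41, a51], [a02, a12, a22, a32, a42, a52], [a03, a13, a23, a33, a43, a53], [a04, a14, a24, a34, a44, a54], [a05, a15, a25, a35, a45, a55]], PySem.Dict.mk [((0:Int), [a00, a11, a22, a33, a44, a55]), ((-1:Int), [a01, a12, a23, a34, a45]), ((-2:Int), [a02, a13, a24, a35]), ((-3:Int), [a03, a14, a25]), ((-4:Int), [a04, a15]), ((-5:Int), [a05]), ((1:Int), [a10, a21, a32, a43, a54]), ((2:Int), [a20, a31, a42, a53]), ((3:Int), [a30, a41, a52]), ((4:Int), [a40, a51]), ((5:Int), [a50])], PySem.Dict.mk [((0:Int), [a00]), ((1:Int), [a01, a10]), ((2:Int), [a02, a11, a20]), ((3:Int), [a03, a12, a21, a30]), ((4:Int), [a04, a13, a22, a31, a40]),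 ((5:Int), [a05, a14, a23, a32, a41, a50]), ((6:Int), [a15, a24, a33, a42, a51]), ((7:Int), [a25, a34, a43, a52]), ((8:Int), [a35, a44, a53]), ((9:Int), [a45, a54]), ((10:Int), [a55])]) := by
    simp [pvBuckets, PySem.List.enumerate_cons, PySem.List.enumerate_nil,
      List.foldl_cons, List.foldl_nil, String.toList_ofList,
      PySem.Dict.modify, PySem.Dict.empty, PySem.Dict.insert, PySem.Dict.getD,
      PySem.Dict.get?, PySem.Dict.contains, List.set, List.getD]
  have r06 : PySem.List.pyRange (0 : Int) (6 : Int) 1 = ([0, 1, 2, 3, 4, 5] : List Int) := by rfl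
  have r36 : PySem.List.pyRange (3 : Int) (6 : Int) 1 = ([3, 4, 5] : List Int) := by rfl
  have r04 : PySem.List.pyRange (0 : Int) (4 : Int) 1 = ([0, 1, 2, 3] : List Int) := by rfl
  have r05 : PySem.List.pyRange (0 : Int) (5 : Int) 1 = ([0, 1, 2, 3, 4] : List Int) := by rfl
  have rm13 : PySem.List.pyRange (-1 : Int) (3 : Int) 1 = ([-1, 0, 1, 2] : List Int) := by rfl
  have rm14 : PySem.List.pyRange (-1 : Int) (4 : Int) 1 = ([-1, 0, 1, 2, 3] : List Int) := by rfl
  have rm15 : PySem.List.pyRange (-1 : Int) (5 : Int) 1 = ([-1, 0, 1, 2, 3, 4] : List Int) := by rfl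
  have r26 : PySem.List.pyRange (2 : Int) (6 : Int) 1 = ([2, 3, 4, 5] : List Int) := by rfl
  have r16 : PySem.List.pyRange (1 : Int) (6 : Int) 1 = ([1, 2, 3, 4, 5] : List Int) := by rfl
  simp only [is_mutant, is_mutant_alt]
  rw [hbuck]
  simp only [PySem.Str.len_eq, List.length_cons, List.length_nil]
  norm_num
  simp only [pvCheckSequences, r36]
  simp [pvCharAt, PySem.List.pyGet?, PySem.Str.pyGet?, PySem.List.pyIdx?, String.toList_ofList,
    r06, r04, r05, rm13, rm14, rm15, r26, r16,
    List.countP_cons, List.countP_nil,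
    pvHv4, pvHv5, pvHv6, pvHs1, pvHs2, pvHs3, pvIteInc]
  rw [pvHitRev4 a03 a12 a21 a30, pvHitRev5 a04 a13 a22 a31 a40, pvHitRev6 a05 a14 a23 a32 a41 a50]
  omega

-- ===== VERDICT (by name: the statement is the Claim_ definition above) =====

theorem is_mutant_spec : Claim_equal_is_mutant := by
  intro dna _
  unfold Spec_is_mutant
  by_cases h6 : dna.length = 6 ∧ ∀ row ∈ dna, row.toList.length = 6
  · obtain ⟨hlen, hrows⟩ := h6
    obtain ⟨s0, s1, s2, s3, s4, s5, rfl⟩ := pvSixOfLen hlen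
    obtain ⟨a00, a01, a02, a03, a04, a05, h0⟩ := pvSixOfLen (hrows s0 (by simp))
    obtain ⟨a10, a11, a12, a13, a14, a15, h1⟩ := pvSixOfLen (hrows s1 (by simp))
    obtain ⟨a20, a21, a22, a23, a24, a25, h2⟩ := pvSixOfLen (hrows s2 (by simp))
    obtain ⟨a30, a31, a32, a33, a34, a35, h3⟩ := pvSixOfLen (hrows s3 (by simp))
    obtain ⟨a40, a41, a42, a43, a44, a45, h4⟩ := pvSixOfLen (hrows s4 (by simp))
    obtain ⟨a50, a51, a52, a53, a54, a55, h5⟩ := pvSixOfLen (hrows s5 (by simp))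
    have e0 : s0 = String.ofList [a00, a01, a02, a03, a04, a05] := by
      rw [← h0, String.ofList_toList]
    have e1 : s1 = String.ofList [a10, a11, a12, a13, a14, a15] := by
      rw [← h1, String.ofList_toList]
    have e2 : s2 = String.ofList [a20, a21, a22, a23, a24, a25] := by
      rw [← h2, String.ofList_toList]
    have e3 : s3 = String.ofList [a30, a31, a32, a33, a34, a35] := by
      rw [← h3, String.ofList_toList]
    have e4 : s4 = String.ofList [a40, a41, a42, a43, a44, a45] := by
      rw [← h4, String.ofList_toList]
    have e5 : s5 = String.ofList [a50, a51, a52, a53, a54, a55] := by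
      rw [← h5, String.ofList_toList]
    subst e0 e1 e2 e3 e4 e5
    exact pvMain6 a00 a01 a02 a03 a04 a05 a10 a11 a12 a13 a14 a15 a20 a21 a22 a23 a24 a25
      a30 a31 a32 a33 a34 a35 a40 a41 a42 a43 a44 a45 a50 a51 a52 a53 a54 a55
  · have hA : ((dna.length == 6) && dna.all (fun row => PySem.Str.len row == 6)) = false := by
      rcases hA : ((dna.length == 6) && dna.all (fun row => PySem.Str.len row == 6)) with _ | _
      · rfl
      · exfalso
        apply h6
        simp only [Bool.and_eq_true, beq_iff_eq, List.all_eq_true, PySem.Str.len_eq] at hA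
        refine ⟨hA.1, fun row hm => ?_⟩
        exact_mod_cast hA.2 row hm
    have hB : ((dna.length != 6) || dna.any (fun row => PySem.Str.len row != 6)) = true := by
      rw [not_and_or] at h6
      push Not at h6
      simp only [Bool.or_eq_true, bne_iff_ne, ne_eq, List.any_eq_true, PySem.Str.len_eq]
      rcases h6 with h | ⟨row, hm, hr⟩
      · exact Or.inl h
      · refine Or.inr ⟨row, hm, ?_⟩
        exact_mod_cast hr
    simp only [is_mutant, is_mutant_alt, hA, hB]
    simp
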